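-- pv_equiv track=rewrite | github.com/tox-dev/sphinx-autodoc-typehints | src/sphinx_autodoc_typehints/__init__.py | _line_is_param_line_for_arg
-- ===== SOURCE A (Python) =====
-- def _get_sphinx_line_keyword_and_argument(line: str) -> tuple[str, str | None] | None:
--     """
--     Extract a keyword, and its optional argument out of a sphinx field option line.
--
--     For example
--     >>> _get_sphinx_line_keyword_and_argument(":param parameter:")
--     ("param", "parameter")
--     >>> _get_sphinx_line_keyword_and_argument(":return:")
--     ("return", None)
--     >>> _get_sphinx_line_keyword_and_argument("some invalid line")
--     None
--     """
--     param_line_without_description = line.split(":", maxsplit=2)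
--     if len(param_line_without_description) != 3:  # noqa: PLR2004
--         return None
--
--     split_directive_and_name = param_line_without_description[1].split(maxsplit=1)
--     if len(split_directive_and_name) != 2:  # noqa: PLR2004
--         if not len(split_directive_and_name):
--             return None
--         return split_directive_and_name[0], None
--
--     return tuple(split_directive_and_name)  # type: ignore[return-value]
--
-- def _line_is_param_line_for_arg(line: str, arg_name: str) -> bool:
--     """Return True if `line` is a valid parameter line for `arg_name`, false otherwise."""
--     keyword_and_name = _get_sphinx_line_keyword_and_argument(line)
--     if keyword_and_name is None:
--         return False
--
--     keyword, doc_name = keyword_and_name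
--     if doc_name is None:
--         return False
--
--     if keyword not in {"param", "parameter", "arg", "argument"}:
--         return False
--
--     return any(doc_name == prefix + arg_name for prefix in ("", "\\*", "\\**", "\\*\\*"))
-- ===== SOURCE B (Python) =====
-- def _line_is_param_line_for_arg(line: str, arg_name: str) -> bool:
--     """Return True if `line` is a valid parameter line for `arg_name`, false otherwise."""
--     i = line.find(":")
--     if i == -1:
--         return False
--     j = line.find(":", i + 1)
--     if j == -1:
--         return False
--     middle = line[i + 1 : j].lstrip()
--     for keyword in ("param", "parameter", "arg", "argument"):
--         if middle.startswith(keyword):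
--             rest = middle[len(keyword):]
--             if rest != rest.lstrip():  # keyword is a whole word followed by whitespace
--                 doc_name = rest.lstrip()
--                 return doc_name != "" and any(
--                     doc_name == prefix + arg_name for prefix in ("", "\\*", "\\**", "\\*\\*")
--                 )
--     return False
-- ===== Notes on version B (the rewrite author's own statement) =====
-- stated objective: simpler
-- what changed: B drops A's two-stage split-and-unpack helper (line.split(':', 2) then middle.split(maxsplit=1) then tuple/None dispatch) and instead finds the first two colons with str.find, slices the field between them, and prefix-matches the four directive keywords directly on the lstripped field.
import Mathlib
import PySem

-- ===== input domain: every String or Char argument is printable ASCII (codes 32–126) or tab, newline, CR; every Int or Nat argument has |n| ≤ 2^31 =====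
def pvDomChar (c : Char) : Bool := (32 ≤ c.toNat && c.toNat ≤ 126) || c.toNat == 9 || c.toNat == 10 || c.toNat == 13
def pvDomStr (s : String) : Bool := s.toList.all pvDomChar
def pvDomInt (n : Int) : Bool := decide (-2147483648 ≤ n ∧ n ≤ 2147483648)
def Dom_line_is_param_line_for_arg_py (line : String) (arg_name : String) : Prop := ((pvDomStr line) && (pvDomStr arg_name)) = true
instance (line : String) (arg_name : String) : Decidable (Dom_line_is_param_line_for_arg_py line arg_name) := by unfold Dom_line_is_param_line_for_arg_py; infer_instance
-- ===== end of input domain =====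

-- B replaces A's two-stage split-and-unpack helper (line.split(":", 2), then middle.split(maxsplit=1))
-- by a single scan: locate the first two colons with str.find, slice the field between them, and
-- prefix-match the four directive keywords directly; objective: simpler (no faster: same O(n) cost).

-- shared literal: the prefixes ("", "\*", "\**", "\*\*") both Python versions compare against
def pvPrefixes : List (List Char) := [[], ['\\','*'], ['\\','*','*'], ['\\','*','\\','*']]

-- shared literal: the four directive keywords
def pvKeywords : List (List Char) :=
  [['p','a','r','a','m'], ['p','a','r','a','m','e','t','e','r'],
   ['a','r','g'], ['a','r','g','u','m','e','n','t']]

-- ===== PORT A =====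
-- port of _get_sphinx_line_keyword_and_argument (on the char list of the line)
def getSphinxKwArg (line : List Char) : Option (List Char × Option (List Char)) :=
  -- line.split(":", maxsplit=2); the separator ":" is non-empty so Python's split cannot raise
  let parts := PySem.Chars.splitOnMax line [':'] 2
  if parts.length ≠ 3 then none
  else
    -- parts[1].split(maxsplit=1)
    let sdn := PySem.Chars.split₀Max (parts.getD 1 []) 1
    if sdn.length ≠ 2 then
      if sdn.length = 0 then none
      else some (sdn.getD 0 [], none)
    else some (sdn.getD 0 [], some (sdn.getD 1 []))

def line_is_param_line_for_arg_py (line : String) (arg_name : String) : Bool :=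
  match getSphinxKwArg line.toList with
  | none => false
  | some (_, none) => false
  | some (keyword, some doc_name) =>
    if !(PySem.Set.contains (PySem.Set.ofList pvKeywords) keyword) then false
    else pvPrefixes.any (fun pre => doc_name == pre ++ arg_name.toList)

-- ===== PORT B =====
-- the for-loop over ("param", "parameter", "arg", "argument") of Source B
def tryKeywords (middle : List Char) (arg : List Char) : List (List Char) → Bool
  | [] => false
  | kw :: kws =>
    if PySem.Chars.startswith middle kw then
      -- rest = middle[len(keyword):]
      let r := PySem.List.slice middle (some (kw.length : Int)) none
      if r ≠ PySem.Chars.lstrip r then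
        let doc := PySem.Chars.lstrip r
        decide (doc ≠ []) && pvPrefixes.any (fun pre => doc == pre ++ arg)
      else tryKeywords middle arg kws
    else tryKeywords middle arg kws

def line_is_param_line_for_arg_py_alt (line : String) (arg_name : String) : Bool :=
  let l := line.toList
  let i := PySem.Chars.find l [':']                      -- line.find(":")
  if i == -1 then false
  else
    let j := PySem.Chars.findFrom l [':'] (i + 1)        -- line.find(":", i + 1)
    if j == -1 then false
    else
      -- middle = line[i+1:j].lstrip()
      let middle := PySem.Chars.lstrip (PySem.List.slice l (some (i + 1)) (some j))
      tryKeywords middle arg_name.toList pvKeywords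

-- ===== PRECONDITION & SPEC =====
def Spec_line_is_param_line_for_arg_py (line : String) (arg_name : String) (out : Bool) : Prop := out = line_is_param_line_for_arg_py_alt line arg_name
instance (line : String) (arg_name : String) (out : Bool) : Decidable (Spec_line_is_param_line_for_arg_py line arg_name out) := by unfold Spec_line_is_param_line_for_arg_py; infer_instance

-- ===== CLAIM (what is proved, stated in full; the proofs are below) =====
def Claim_equal_line_is_param_line_for_arg_py : Prop := ∀ (line : String) (arg_name : String), Dom_line_is_param_line_for_arg_py line arg_name → Spec_line_is_param_line_for_arg_py line arg_name (line_is_param_line_for_arg_py line arg_name)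

-- ===== LEMMAS AND PROOFS =====

-- line.find(":") locates the first colon: length of the colon-free prefix
theorem find_go_singleton (c : Char) (l : List Char) (k : Nat) :
    PySem.Chars.find.go [c] l k =
      if c ∈ l then ((k : Int) + (l.takeWhile (· ≠ c)).length) else -1 := by
  induction l generalizing k with
  | nil => simp [PySem.Chars.find.go]
  | cons a t ih =>
    rw [PySem.Chars.find.go]
    by_cases h : a = c
    · subst h
      simp [List.isPrefixOf, List.takeWhile]
    · have hpre : List.isPrefixOf [c] (a :: t) = false := by
        simp [List.isPrefixOf]
        exact fun hc : c = a => h hc.symm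
      rw [hpre]
      have hmem : (c ∈ a :: t) = (c ∈ t) := by
        simp only [List.mem_cons, eq_iff_iff]
        constructor
        · rintro (hc | hc); exact absurd hc.symm h; exact hc
        · exact Or.inr
      simp only [Bool.false_eq_true, if_false, ih, hmem]
      by_cases hm : c ∈ t
      · simp [hm, List.takeWhile, h]
        ring
      · simp [hm]

theorem find_singleton (c : Char) (l : List Char) :
    PySem.Chars.find l [c] =
      if c ∈ l then ((l.takeWhile (· ≠ c)).length : Int) else -1 := by
  rw [PySem.Chars.find, find_go_singleton]; simp

-- structural model of splitOnMax.go for sep = [':']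
def colonSplitGo : Nat → List Char → List Char → List (List Char) → List (List Char)
  | _, [], cur, acc => (cur.reverse :: acc).reverse
  | m, c :: rest, cur, acc =>
    if m = 0 then ((cur.reverse ++ (c :: rest)) :: acc).reverse
    else if c = ':' then colonSplitGo (m-1) rest [] (cur.reverse :: acc)
    else colonSplitGo m rest (c :: cur) acc

theorem splitOnMax_go_colon (fuel : Nat) (m : Nat) (l cur : List Char) (acc : List (List Char))
    (h : l.length ≤ fuel) :
    PySem.Chars.splitOnMax.go [':'] fuel m l cur acc = colonSplitGo m l cur acc := by
  induction fuel generalizing m l cur acc with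
  | zero =>
    have : l = [] := by simpa using List.length_eq_zero_iff.mp (Nat.le_zero.mp h)
    subst this
    simp [PySem.Chars.splitOnMax.go, colonSplitGo]
  | succ fuel ih =>
    cases l with
    | nil => simp [PySem.Chars.splitOnMax.go, colonSplitGo]
    | cons c rest =>
      rw [PySem.Chars.splitOnMax.go, colonSplitGo]
      by_cases hm : m = 0
      · simp [hm]
      · simp only [hm, if_false]
        by_cases hc : c = ':'
        · subst hc
          have hpre : List.isPrefixOf [':'] (':' :: rest) = true := by
            simp [List.isPrefixOf]
          simp only [hpre, if_true]
          rw [ih]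
          · simp
          · simpa using Nat.le_of_succ_le_succ (by simpa using h)
        · have hpre : List.isPrefixOf [':'] (c :: rest) = false := by
            simp [List.isPrefixOf]
            exact fun hc' : ':' = c => hc hc'.symm
          simp only [hpre, hc, Bool.false_eq_true, if_false]
          exact ih m rest (c :: cur) acc (by simpa using Nat.le_of_succ_le_succ h)

theorem colonSplitGo_step (m : Nat) (l cur : List Char) (acc : List (List Char)) (hm : 1 ≤ m) :
    colonSplitGo m l cur acc =
      match l.dropWhile (· ≠ ':') with
      | [] => ((cur.reverse ++ l) :: acc).reverse
      | _ :: r => colonSplitGo (m-1) r [] ((cur.reverse ++ l.takeWhile (· ≠ ':')) :: acc) := by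
  induction l generalizing cur with
  | nil => simp [colonSplitGo]
  | cons c rest ih =>
    by_cases hc : c = ':'
    · subst hc
      simp [colonSplitGo, Nat.ne_of_gt hm, List.dropWhile, List.takeWhile]
    · rw [colonSplitGo]
      simp only [Nat.ne_of_gt hm, if_false, hc]
      rw [ih]
      simp [List.dropWhile, List.takeWhile, hc]

theorem colonSplitGo_zero (l : List Char) (acc : List (List Char)) :
    colonSplitGo 0 l [] acc = (l :: acc).reverse := by
  cases l <;> simp [colonSplitGo]

-- line.split(":", maxsplit=2) characterised by the first two colons
theorem splitOnMax_colon_2 (l : List Char) :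
    PySem.Chars.splitOnMax l [':'] 2 =
      match l.dropWhile (· ≠ ':') with
      | [] => [l]
      | _ :: r1 =>
        match r1.dropWhile (· ≠ ':') with
        | [] => [l.takeWhile (· ≠ ':'), r1]
        | _ :: r2 => [l.takeWhile (· ≠ ':'), r1.takeWhile (· ≠ ':'), r2] := by
  rw [PySem.Chars.splitOnMax]
  rw [if_neg (by norm_num)]
  rw [splitOnMax_go_colon _ _ _ _ _ (by omega)]
  rw [show (2 : Int).toNat = 2 from rfl]
  rw [colonSplitGo_step _ _ _ _ (by norm_num)]
  cases hd1 : l.dropWhile (· ≠ ':') with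
  | nil => simp
  | cons c r1 =>
    dsimp only
    rw [colonSplitGo_step _ _ _ _ (by norm_num)]
    obtain ⟨d2, hd2⟩ : ∃ d2, r1.dropWhile (· ≠ ':') = d2 := ⟨_, rfl⟩
    simp only [hd2]
    cases d2 with
    | nil => simp
    | cons c2 r2 =>
      dsimp only
      rw [show (2 : Nat) - 1 - 1 = 0 from rfl, colonSplitGo_zero]
      simp

-- middle.split(maxsplit=1) characterised by takeWhile/dropWhile
theorem split0Max_go_succ_nil (fuel m : Nat) (l : List Char) (acc : List (List Char))
    (h : l.dropWhile PySem.Chars.isspace = []) :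
    PySem.Chars.split₀Max.go (fuel + 1) m l acc = acc.reverse := by
  rw [PySem.Chars.split₀Max.go, h]

theorem split0Max_go_succ_cons (fuel m : Nat) (l : List Char) (acc : List (List Char))
    (x : Char) (r : List Char) (h : l.dropWhile PySem.Chars.isspace = x :: r) :
    PySem.Chars.split₀Max.go (fuel + 1) m l acc =
      if m = 0 then ((x :: r) :: acc).reverse
      else PySem.Chars.split₀Max.go fuel (m - 1)
        ((x :: r).dropWhile (fun c => !PySem.Chars.isspace c))
        ((x :: r).takeWhile (fun c => !PySem.Chars.isspace c) :: acc) := by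
  rw [PySem.Chars.split₀Max.go, h]

theorem split0Max_one (s : List Char) :
    PySem.Chars.split₀Max s 1 =
      if s.dropWhile PySem.Chars.isspace = [] then []
      else
        let l' := s.dropWhile PySem.Chars.isspace
        let tok := l'.takeWhile (fun c => !PySem.Chars.isspace c)
        let doc := (l'.dropWhile (fun c => !PySem.Chars.isspace c)).dropWhile PySem.Chars.isspace
        if doc = [] then [tok] else [tok, doc] := by
  rw [PySem.Chars.split₀Max]
  norm_num
  cases hdw : s.dropWhile PySem.Chars.isspace with
  | nil =>
    rw [show s.length + 1 = s.length + 1 from rfl, split0Max_go_succ_nil _ _ _ _ hdw]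
    simp
    exact List.dropWhile_eq_nil_iff.mp hdw
  | cons x r =>
    rw [split0Max_go_succ_cons _ _ _ _ _ _ hdw]
    have hlen : 1 ≤ s.length := by
      cases s with
      | nil => simp at hdw
      | cons a b => simp
    rw [if_neg (by norm_num), show s.length = (s.length - 1) + 1 from by omega]
    have hne1 : ¬ ∀ c ∈ s, PySem.Chars.isspace c = true := by
      intro hall
      rw [List.dropWhile_eq_nil_iff.mpr hall] at hdw
      exact (List.cons_ne_nil _ _) hdw.symm
    rw [if_neg hne1]
    cases hdw2 : ((x :: r).dropWhile (fun c => !PySem.Chars.isspace c)).dropWhile PySem.Chars.isspace with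
    | nil =>
      rw [split0Max_go_succ_nil _ _ _ _ hdw2]
      rw [if_pos (List.dropWhile_eq_nil_iff.mp hdw2)]
      simp
    | cons y t =>
      rw [split0Max_go_succ_cons _ _ _ _ _ _ hdw2]
      have hne2 : ¬ ∀ c ∈ (x :: r).dropWhile (fun c => !PySem.Chars.isspace c), PySem.Chars.isspace c = true := by
        intro hall
        rw [List.dropWhile_eq_nil_iff.mpr hall] at hdw2
        exact (List.cons_ne_nil _ _) hdw2.symm
      rw [if_neg hne2]
      simp

theorem drop_takeWhile_length (p : Char → Bool) (l : List Char) :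
    l.drop (l.takeWhile p).length = l.dropWhile p := by
  calc l.drop (l.takeWhile p).length
      = (l.takeWhile p ++ l.dropWhile p).drop (l.takeWhile p).length := by
        rw [List.takeWhile_append_dropWhile]
    _ = l.dropWhile p := List.drop_left

-- B's loop guard (startswith kw, and the next char is whitespace) fires exactly when kw is the
-- whole first whitespace-token of the field
theorem fire_iff (l' kw : List Char)
    (hns : ∀ c ∈ kw, PySem.Chars.isspace c = false) :
    (PySem.Chars.startswith l' kw = true ∧
      l'.drop kw.length ≠ (l'.drop kw.length).dropWhile PySem.Chars.isspace)
    ↔ (l'.takeWhile (fun c => !PySem.Chars.isspace c) = kw ∧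
       l'.dropWhile (fun c => !PySem.Chars.isspace c) ≠ []) := by
  constructor
  · rintro ⟨hsw, hr⟩
    obtain ⟨u, rfl⟩ := (PySem.Chars.startswith_iff _ _).mp hsw
    rw [List.drop_left] at hr
    cases u with
    | nil => simp at hr
    | cons c t =>
      have hc : PySem.Chars.isspace c = true := by
        by_contra hcs
        rw [List.dropWhile_cons_of_neg (by simpa using hcs)] at hr
        exact hr rfl
      constructor
      · rw [List.takeWhile_append_of_pos (by intro a ha; simp [hns a ha]),
            List.takeWhile_cons_of_neg (by simp [hc])]
        simp
      · rw [List.dropWhile_append_of_pos (by intro a ha; simp [hns a ha]),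
            List.dropWhile_cons_of_neg (by simp [hc])]
        simp
  · rintro ⟨htok, hrest⟩
    have hpre : kw <+: l' := htok ▸ List.takeWhile_prefix _
    have hdrop : l'.drop kw.length = l'.dropWhile (fun c => !PySem.Chars.isspace c) := by
      rw [← htok, drop_takeWhile_length]
    refine ⟨(PySem.Chars.startswith_iff _ _).mpr hpre, ?_⟩
    rw [hdrop]
    cases hd : l'.dropWhile (fun c => !PySem.Chars.isspace c) with
    | nil => exact absurd hd hrest
    | cons c t =>
      have hc : PySem.Chars.isspace c = true := by
        have := List.head_dropWhile_not (fun c => !PySem.Chars.isspace c) (l := l') (by rw [hd]; simp)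
        simpa [hd] using this
      rw [List.dropWhile_cons_of_pos hc]
      intro heq
      have : (c :: t).length ≤ t.length := by
        rw [heq]; exact List.length_dropWhile_le _ _
      simp at this

theorem tryKeywords_cons (l' arg kw : List Char) (kws : List (List Char))
    (hns : ∀ c ∈ kw, PySem.Chars.isspace c = false) :
    tryKeywords l' arg (kw :: kws) =
      if l'.takeWhile (fun c => !PySem.Chars.isspace c) = kw ∧
         l'.dropWhile (fun c => !PySem.Chars.isspace c) ≠ [] then
        (decide ((l'.dropWhile (fun c => !PySem.Chars.isspace c)).dropWhile PySem.Chars.isspace ≠ []) &&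
          pvPrefixes.any (fun pre =>
            (l'.dropWhile (fun c => !PySem.Chars.isspace c)).dropWhile PySem.Chars.isspace == pre ++ arg))
      else tryKeywords l' arg kws := by
  rw [tryKeywords]
  have hsl : PySem.List.slice l' (some (kw.length : Int)) none = l'.drop kw.length := by
    rw [PySem.List.slice_from _ (by positivity)]
    simp
  simp only [hsl, PySem.Chars.lstrip]
  by_cases h1 : PySem.Chars.startswith l' kw = true
  · simp only [h1, if_true]
    by_cases h2 : l'.drop kw.length ≠ (l'.drop kw.length).dropWhile PySem.Chars.isspace
    · have hfire := (fire_iff l' kw hns).mp ⟨h1, h2⟩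
      rw [if_pos h2, if_pos hfire]
      have hdrop : l'.drop kw.length = l'.dropWhile (fun c => !PySem.Chars.isspace c) := by
        rw [← hfire.1, drop_takeWhile_length]
      rw [hdrop]
    · have hnf : ¬ (l'.takeWhile (fun c => !PySem.Chars.isspace c) = kw ∧
          l'.dropWhile (fun c => !PySem.Chars.isspace c) ≠ []) := by
        intro hf
        exact h2 ((fire_iff l' kw hns).mpr hf).2
      rw [if_neg (by simpa using h2), if_neg hnf]
  · have hnf : ¬ (l'.takeWhile (fun c => !PySem.Chars.isspace c) = kw ∧
        l'.dropWhile (fun c => !PySem.Chars.isspace c) ≠ []) := by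
      intro hf
      exact h1 ((fire_iff l' kw hns).mpr hf).1
    rw [if_neg (by simpa using h1), if_neg hnf]

-- the heart: A's treatment of the field between the colons agrees with B's keyword loop
theorem core (mid arg : List Char) :
    (match
      (let sdn := PySem.Chars.split₀Max mid 1
       if sdn.length ≠ 2 then
         if sdn.length = 0 then none
         else some (sdn.getD 0 [], (none : Option (List Char)))
       else some (sdn.getD 0 [], some (sdn.getD 1 []))) with
     | none => false
     | some (_, none) => false
     | some (keyword, some doc_name) =>
       if !(PySem.Set.contains (PySem.Set.ofList pvKeywords) keyword) then false
       else pvPrefixes.any (fun pre => doc_name == pre ++ arg))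
    = tryKeywords (mid.dropWhile PySem.Chars.isspace) arg pvKeywords := by
  have hns : ∀ kw ∈ pvKeywords, ∀ c ∈ kw, PySem.Chars.isspace c = false := by
    intro kw hkw c hc
    fin_cases hkw <;> fin_cases hc <;> rfl
  cases hl : mid.dropWhile PySem.Chars.isspace with
  | nil =>
    rw [split0Max_one, hl, if_pos rfl]
    simp [pvKeywords, tryKeywords, PySem.Chars.startswith, List.isPrefixOf]
  | cons x r =>
    rw [split0Max_one, hl, if_neg (List.cons_ne_nil x r)]
    rw [show pvKeywords = [['p','a','r','a','m'], ['p','a','r','a','m','e','t','e','r'],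
        ['a','r','g'], ['a','r','g','u','m','e','n','t']] from rfl]
    rw [tryKeywords_cons _ _ _ _ (hns _ (by simp [pvKeywords])),
        tryKeywords_cons _ _ _ _ (hns _ (by simp [pvKeywords])),
        tryKeywords_cons _ _ _ _ (hns _ (by simp [pvKeywords])),
        tryKeywords_cons _ _ _ _ (hns _ (by simp [pvKeywords])),
        show ∀ a, tryKeywords (x :: r) a [] = false from fun _ => rfl]
    dsimp only
    by_cases hdoc : ((x :: r).dropWhile (fun c => !PySem.Chars.isspace c)).dropWhile PySem.Chars.isspace = []
    · rw [if_pos hdoc]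
      rw [if_pos (by simp : ([(x :: r).takeWhile (fun c => !PySem.Chars.isspace c)] : List (List Char)).length ≠ 2)]
      rw [if_neg (by simp : ¬ ([(x :: r).takeWhile (fun c => !PySem.Chars.isspace c)] : List (List Char)).length = 0)]
      split_ifs <;> simp [hdoc]
    · rw [if_neg hdoc]
      rw [if_neg (by simp : ¬ ([(x :: r).takeWhile (fun c => !PySem.Chars.isspace c),
            ((x :: r).dropWhile (fun c => !PySem.Chars.isspace c)).dropWhile PySem.Chars.isspace] : List (List Char)).length ≠ 2)]
      have hrest : (x :: r).dropWhile (fun c => !PySem.Chars.isspace c) ≠ [] := by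
        intro h
        rw [h] at hdoc
        exact hdoc rfl
      simp only [List.getD_cons_zero, List.getD_cons_succ]
      rw [show (decide (((x :: r).dropWhile (fun c => !PySem.Chars.isspace c)).dropWhile PySem.Chars.isspace ≠ []))
            = true from decide_eq_true hdoc]
      simp only [Bool.true_and]
      have hsplit : ∀ b : Bool, (if (!b) = true then false else
          pvPrefixes.any (fun pre =>
            ((x :: r).dropWhile (fun c => !PySem.Chars.isspace c)).dropWhile PySem.Chars.isspace == pre ++ arg))
          = (b && pvPrefixes.any (fun pre =>
            ((x :: r).dropWhile (fun c => !PySem.Chars.isspace c)).dropWhile PySem.Chars.isspace == pre ++ arg)) := by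
        intro b; cases b <;> simp
      rw [hsplit]
      split_ifs with g1 g2 g3 g4
      · rw [g1.1]; simp
      · rw [g2.1]; simp
      · rw [g3.1]; simp
      · rw [g4.1]; simp
      · have hcon : PySem.Set.contains (PySem.Set.ofList
            [(['p','a','r','a','m'] : List Char), ['p','a','r','a','m','e','t','e','r'],
             ['a','r','g'], ['a','r','g','u','m','e','n','t']])
            ((x :: r).takeWhile (fun c => !PySem.Chars.isspace c)) = false := by
          rw [show PySem.Set.ofList
              [(['p','a','r','a','m'] : List Char), ['p','a','r','a','m','e','t','e','r'],
               ['a','r','g'], ['a','r','g','u','m','e','n','t']] = pvKeywords from by decide]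
          have n1 : (x :: r).takeWhile (fun c => !PySem.Chars.isspace c) ≠ ['p','a','r','a','m'] :=
            fun h => g1 ⟨h, hrest⟩
          have n2 : (x :: r).takeWhile (fun c => !PySem.Chars.isspace c) ≠ ['p','a','r','a','m','e','t','e','r'] :=
            fun h => g2 ⟨h, hrest⟩
          have n3 : (x :: r).takeWhile (fun c => !PySem.Chars.isspace c) ≠ ['a','r','g'] :=
            fun h => g3 ⟨h, hrest⟩
          have n4 : (x :: r).takeWhile (fun c => !PySem.Chars.isspace c) ≠ ['a','r','g','u','m','e','n','t'] :=
            fun h => g4 ⟨h, hrest⟩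
          simp [PySem.Set.contains, pvKeywords, n1, n2, n3, n4]
        rw [hcon]
        simp

theorem take_takeWhile_length (p : Char → Bool) (l : List Char) :
    l.take (l.takeWhile p).length = l.takeWhile p := by
  calc l.take (l.takeWhile p).length
      = (l.takeWhile p ++ l.dropWhile p).take (l.takeWhile p).length := by
        rw [List.takeWhile_append_dropWhile]
    _ = l.takeWhile p := List.take_left

theorem dropWhile_head_false (p : Char → Bool) (l r : List Char) (c : Char)
    (h : l.dropWhile p = c :: r) : p c = false := by
  have hne : l.dropWhile p ≠ [] := by rw [h]; simp
  have h2 := List.head_dropWhile_not p hne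
  have h4 := List.head?_eq_some_head hne
  conv at h4 => lhs; rw [h]
  simp only [List.head?_cons, Option.some.injEq] at h4
  rw [← h4] at h2
  exact h2

-- the two ports agree on every input
theorem ports_agree (line arg_name : String) :
    line_is_param_line_for_arg_py line arg_name = line_is_param_line_for_arg_py_alt line arg_name := by
  unfold line_is_param_line_for_arg_py line_is_param_line_for_arg_py_alt getSphinxKwArg
  generalize line.toList = l
  generalize arg_name.toList = a
  dsimp only
  rw [splitOnMax_colon_2]
  cases hd1 : l.dropWhile (· ≠ ':') with
  | nil =>
    dsimp only
    rw [if_pos (by simp : ([l] : List (List Char)).length ≠ 3)]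
    have hni : ':' ∉ l := by
      intro hm
      have := List.dropWhile_eq_nil_iff.mp hd1 _ hm
      simp at this
    rw [find_singleton, if_neg hni]
    simp
  | cons c r1 =>
    dsimp only
    have hc : c = ':' := by simpa using dropWhile_head_false _ _ _ _ hd1
    subst hc
    have hl2 : l = l.takeWhile (· ≠ ':') ++ (':' :: r1) := by
      conv_lhs => rw [← List.takeWhile_append_dropWhile (p := (· ≠ ':')) (l := l)]
      rw [hd1]
    have hmem : ':' ∈ l := by rw [hl2]; simp
    have hlen1 : (l.takeWhile (· ≠ ':')).length + 1 ≤ l.length := by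
      conv_rhs => rw [hl2]
      simp
    have hdrop1 : l.drop ((l.takeWhile (· ≠ ':')).length + 1) = r1 := by
      have h5 : l.drop ((l.takeWhile (· ≠ ':')).length) = ':' :: r1 := by
        rw [drop_takeWhile_length, hd1]
      have h6 : l.drop ((l.takeWhile (· ≠ ':')).length + 1)
          = (l.drop ((l.takeWhile (· ≠ ':')).length)).drop 1 := by
        rw [List.drop_drop]
      rw [h6, h5]
      rfl
    have hcast : ((l.takeWhile (· ≠ ':')).length : Int) + 1
        = (((l.takeWhile (· ≠ ':')).length + 1 : Nat) : Int) := by push_cast; ring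
    obtain ⟨d2, hd2⟩ : ∃ d2, r1.dropWhile (· ≠ ':') = d2 := ⟨_, rfl⟩
    simp only [hd2]
    cases d2 with
    | nil =>
      dsimp only
      rw [if_pos (by simp : ([l.takeWhile (· ≠ ':'), r1] : List (List Char)).length ≠ 3)]
      rw [find_singleton, if_pos hmem]
      rw [show (((l.takeWhile (· ≠ ':')).length : Int) == -1) = false from by simp]
      simp only [Bool.false_eq_true, if_false]
      rw [hcast, PySem.Chars.findFrom_natCast _ _ _ hlen1, hdrop1, find_singleton]
      have hni2 : ':' ∉ r1 := by
        intro hm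
        have := List.dropWhile_eq_nil_iff.mp hd2 _ hm
        simp at this
      rw [if_neg hni2]
      simp
    | cons c2 r2 =>
      dsimp only
      have hc2 : c2 = ':' := by simpa using dropWhile_head_false _ _ _ _ hd2
      subst hc2
      have hr2 : r1 = r1.takeWhile (· ≠ ':') ++ (':' :: r2) := by
        conv_lhs => rw [← List.takeWhile_append_dropWhile (p := (· ≠ ':')) (l := r1)]
        simp only [hd2]
      have hmem2 : ':' ∈ r1 := by rw [hr2]; simp
      rw [if_neg (by simp : ¬ ([l.takeWhile (· ≠ ':'), r1.takeWhile (· ≠ ':'), r2] : List (List Char)).length ≠ 3)]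
      rw [find_singleton, if_pos hmem]
      rw [show (((l.takeWhile (· ≠ ':')).length : Int) == -1) = false from by simp]
      simp only [Bool.false_eq_true, if_false]
      rw [hcast, PySem.Chars.findFrom_natCast _ _ _ hlen1, hdrop1, find_singleton, if_pos hmem2]
      rw [if_neg (by omega : ¬ (((r1.takeWhile (· ≠ ':')).length : Int) = -1))]
      have hjne : ((((l.takeWhile (· ≠ ':')).length + 1 : Nat) : Int)
          + ((r1.takeWhile (· ≠ ':')).length : Int)) ≠ -1 := by push_cast; omega
      rw [show (((((l.takeWhile (· ≠ ':')).length + 1 : Nat) : Int)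
            + ((r1.takeWhile (· ≠ ':')).length : Int)) == -1) = false from beq_eq_false_iff_ne.mpr hjne]
      simp only [Bool.false_eq_true, if_false]
      have hslice : PySem.List.slice l (some ((((l.takeWhile (· ≠ ':')).length + 1 : Nat) : Int)))
          (some ((((l.takeWhile (· ≠ ':')).length + 1 : Nat) : Int) + ((r1.takeWhile (· ≠ ':')).length : Int)))
          = r1.takeWhile (· ≠ ':') := by
        rw [show (((l.takeWhile (· ≠ ':')).length + 1 : Nat) : Int) + ((r1.takeWhile (· ≠ ':')).length : Int)
              = (((l.takeWhile (· ≠ ':')).length + 1 + (r1.takeWhile (· ≠ ':')).length : Nat) : Int) from by push_cast; ring]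
        rw [PySem.List.slice_natCast]
        rw [show (l.takeWhile (· ≠ ':')).length + 1 + (r1.takeWhile (· ≠ ':')).length
              - ((l.takeWhile (· ≠ ':')).length + 1) = (r1.takeWhile (· ≠ ':')).length from by omega]
        rw [hdrop1]
        exact take_takeWhile_length _ r1
      rw [hslice]
      rw [show (([l.takeWhile (· ≠ ':'), r1.takeWhile (· ≠ ':'), r2] : List (List Char)).getD 1 [])
            = r1.takeWhile (· ≠ ':') from rfl]
      rw [show PySem.Chars.lstrip (r1.takeWhile (· ≠ ':'))
            = (r1.takeWhile (· ≠ ':')).dropWhile PySem.Chars.isspace from rfl]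
      exact core (r1.takeWhile (· ≠ ':')) a

-- ===== VERDICT (by name: the statement is the Claim_ definition above) =====
theorem line_is_param_line_for_arg_py_spec : Claim_equal_line_is_param_line_for_arg_py := by
  intro line arg_name _
  unfold Spec_line_is_param_line_for_arg_py
  exact ports_agree line arg_name
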